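-- pv_equiv track=rewrite | github.com/sunnytulakorn/Coding-by-Python | DataSci/Lab09_2_630510582.py | grp_reports
-- ===== SOURCE A (Python) =====
-- def grp_reports(stu_list):
--     genderList = {"Female" : [], "Male" : []}
--     major_ = {"01": None,"02": None,"03": None,"04": None,"05":None}
--     majorList_ = ["01","02","03","04","05"]
--     room=[[],[],[],[],[]]
--     for i in range (len(stu_list)):
--         if(stu_list[i][1] == "Female"):
--             genderList['Female'].append(stu_list[i][0])
--         else:
--             genderList['Male'].append(stu_list[i][0])
--         stuRoom = stu_list[i][0]
--         if(str(stuRoom[2:4]) == "01"):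
--             room[0].append(stu_list[i][0])
--         elif(str(stuRoom[2:4]) == "02"):
--             room[1].append(stu_list[i][0])
--         elif(str(stuRoom[2:4]) == "03"):
--             room[2].append(stu_list[i][0])
--         elif(str(stuRoom[2:4]) == "04"):
--             room[3].append(stu_list[i][0])
--         elif(str(stuRoom[2:4]) == "05"):
--             room[4].append(stu_list[i][0])
--     num = 0
--     for i in majorList_:
--         major_[i] = tuple(room[num])
--         num+=1
--     return(genderList,major_)
-- ===== SOURCE B (Python) =====
-- def grp_reports(stu_list):
--     genderList = {
--         "Female": [s[0] for s in stu_list if s[1] == "Female"],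
--         "Male": [s[0] for s in stu_list if s[1] != "Female"],
--     }
--     major_ = {code: tuple(s[0] for s in stu_list if s[0][2:4] == code)
--               for code in ["01", "02", "03", "04", "05"]}
--     return (genderList, major_)
-- ===== Notes on version B (the rewrite author's own statement) =====
-- stated objective: idiomatic
-- what changed: Replaces the single index-driven bucketing loop (appending into a mutable room array plus a second counter loop copying buckets into the dict) with independent per-category comprehensions: two gender comprehensions over the list and a dict comprehension over the five major codes, each doing its own scan.
import Mathlib
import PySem

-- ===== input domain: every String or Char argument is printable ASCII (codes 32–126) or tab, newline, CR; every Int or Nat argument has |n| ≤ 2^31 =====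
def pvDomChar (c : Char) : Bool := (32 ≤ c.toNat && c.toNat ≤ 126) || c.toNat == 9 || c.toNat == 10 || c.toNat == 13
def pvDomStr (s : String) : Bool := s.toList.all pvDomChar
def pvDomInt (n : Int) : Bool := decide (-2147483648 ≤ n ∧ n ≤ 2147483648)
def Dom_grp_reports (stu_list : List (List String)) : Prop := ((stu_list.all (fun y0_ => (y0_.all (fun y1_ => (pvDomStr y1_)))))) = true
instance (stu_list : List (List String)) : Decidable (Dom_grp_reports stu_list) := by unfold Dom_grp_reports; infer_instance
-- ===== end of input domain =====

-- B replaces A's single index-driven bucketing loop by independent per-category comprehensions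
-- (two gender scans and one scan per major code); objective: more idiomatic, same cost class.

-- ===== PORT A =====
-- the state of A's loop: (Female, Male, room[0], room[1], room[2], room[3], room[4])
abbrev GrpSt := List String × List String × List String × List String × List String × List String × List String

-- A's loop body for one row stu_list[i]
def grpBody (st : GrpSt) (row : List String) : GrpSt :=
  match st with
  | (f, m, r1, r2, r3, r4, r5) =>
    let fm : List String × List String :=
      if PySem.List.pyGetD row 1 "" == "Female"
      then (f ++ [PySem.List.pyGetD row 0 ""], m)
      else (f, m ++ [PySem.List.pyGetD row 0 ""])
    let stuRoom := PySem.List.pyGetD row 0 ""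
    let sl := PySem.Str.slice stuRoom (some 2) (some 4)
    if sl == "01" then (fm.1, fm.2, r1 ++ [stuRoom], r2, r3, r4, r5)
    else if sl == "02" then (fm.1, fm.2, r1, r2 ++ [stuRoom], r3, r4, r5)
    else if sl == "03" then (fm.1, fm.2, r1, r2, r3 ++ [stuRoom], r4, r5)
    else if sl == "04" then (fm.1, fm.2, r1, r2, r3, r4 ++ [stuRoom], r5)
    else if sl == "05" then (fm.1, fm.2, r1, r2, r3, r4, r5 ++ [stuRoom])
    else (fm.1, fm.2, r1, r2, r3, r4, r5)

def grp_reports (stu_list : List (List String)) : (List (String × List String)) × (List (String × List String)) :=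
  let st := (PySem.List.pyRange 0 (PySem.List.len stu_list) 1).foldl
      (fun st i => grpBody st (PySem.List.pyGetD stu_list i [])) ([], [], [], [], [], [], [])
  match st with
  | (f, m, r1, r2, r3, r4, r5) =>
    let room := [r1, r2, r3, r4, r5]
    let majorList_ := ["01", "02", "03", "04", "05"]
    -- second loop: num = 0; for i in majorList_: major_[i] = tuple(room[num]); num += 1
    let major := (majorList_.foldl
      (fun (p : List (String × List String) × Int) i =>
        (p.1 ++ [(i, PySem.List.pyGetD room p.2 [])], p.2 + 1)) ([], 0)).1
    ([("Female", f), ("Male", m)], major)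

-- ===== PORT B =====
def grp_reports_alt (stu_list : List (List String)) : (List (String × List String)) × (List (String × List String)) :=
  ([("Female", (stu_list.filter (fun s => PySem.List.pyGetD s 1 "" == "Female")).map
        (fun s => PySem.List.pyGetD s 0 "")),
    ("Male", (stu_list.filter (fun s => !(PySem.List.pyGetD s 1 "" == "Female"))).map
        (fun s => PySem.List.pyGetD s 0 ""))],
   (["01", "02", "03", "04", "05"]).map (fun code =>
     (code, (stu_list.filter
         (fun s => PySem.Str.slice (PySem.List.pyGetD s 0 "") (some 2) (some 4) == code)).map
       (fun s => PySem.List.pyGetD s 0 ""))))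

-- ===== PRECONDITION & SPEC =====
-- Pre_: each row must have at least two entries; on a shorter row Python A raises IndexError
-- at stu_list[i][1] (or stu_list[i][0]).
def Pre_grp_reports (stu_list : List (List String)) : Prop := ∀ s ∈ stu_list, 2 ≤ s.length
instance (stu_list : List (List String)) : Decidable (Pre_grp_reports stu_list) := by
  unfold Pre_grp_reports; infer_instance

def pvWitness_grp_reports : List (List String) := [["AB01X", "Female"], ["CD02Y", "Male"]]

def Spec_grp_reports (stu_list : List (List String)) (out : (List (String × List String)) × (List (String × List String))) : Prop := out = grp_reports_alt stu_list
instance (stu_list : List (List String)) (out : (List (String × List String)) × (List (String × List String))) : Decidable (Spec_grp_reports stu_list out) := by unfold Spec_grp_reports; infer_instance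

-- ===== CLAIM (what is proved, stated in full; the proofs are below) =====
def Claim_equal_grp_reports : Prop := ∀ (stu_list : List (List String)), Dom_grp_reports stu_list → Pre_grp_reports stu_list → Spec_grp_reports stu_list (grp_reports stu_list)

-- ===== LEMMAS AND PROOFS =====

-- the per-category lists B computes
def catGender (b : Bool) (l : List (List String)) : List String :=
  (l.filter (fun s => (PySem.List.pyGetD s 1 "" == "Female") == b)).map (fun s => PySem.List.pyGetD s 0 "")
def catCode (code : String) (l : List (List String)) : List String :=
  (l.filter (fun s => PySem.Str.slice (PySem.List.pyGetD s 0 "") (some 2) (some 4) == code)).map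
    (fun s => PySem.List.pyGetD s 0 "")

lemma grpLoop_inv (l : List (List String)) (f m r1 r2 r3 r4 r5 : List String) :
    l.foldl grpBody (f, m, r1, r2, r3, r4, r5) =
      (f ++ catGender true l, m ++ catGender false l,
       r1 ++ catCode "01" l, r2 ++ catCode "02" l, r3 ++ catCode "03" l,
       r4 ++ catCode "04" l, r5 ++ catCode "05" l) := by
  induction l generalizing f m r1 r2 r3 r4 r5 with
  | nil => simp [catGender, catCode]
  | cons x xs ih =>
    simp only [List.foldl_cons, grpBody]
    split_ifs with hg h1 h2 h3 h4 h5 h1 h2 h3 h4 h5 <;>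
      rw [ih] <;> simp_all [catGender, catCode]

-- ===== VERDICT (by name: the statement is the Claim_ definition above) =====
theorem grp_reports_spec : Claim_equal_grp_reports := by
  intro stu_list _ _
  unfold Spec_grp_reports grp_reports grp_reports_alt
  rw [PySem.List.foldl_pyRange_zero_pyGetD]
  rw [grpLoop_inv]
  simp [catGender, catCode, PySem.List.pyGetD_ofNat']
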